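-- pv_equiv track=rewrite | github.com/Sologa/SurveyX | src/modules/preprocessor/data_cleaner.py | _choose_bib_entry_type
-- ===== SOURCE A (Python) =====
-- def _choose_bib_entry_type(venue: str | None) -> str:
--     if not venue:
--         return "article"
--     v = venue.lower()
--     conf_markers = [
--         "neurips",
--         "iclr",
--         "icml",
--         "kdd",
--         "cvpr",
--         "eccv",
--         "acl",
--         "emnlp",
--         "naacl",
--         "coling",
--         "aaai",
--         "ijcai",
--         "sigkdd",
--         "sigir",
--         "wsdm",
--         "www",
--         "conference",
--         "workshop",
--     ]
--     if any(m in v for m in conf_markers):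
--         return "inproceedings"
--     return "article" if "arxiv" in v or "journal" in v else "article"
-- ===== SOURCE B (Python) =====
-- def _choose_bib_entry_type(venue: str | None) -> str:
--     if not venue:
--         return "article"
--     v = venue.lower()
--     markers = (
--         "neurips", "iclr", "icml", "kdd", "cvpr", "eccv", "acl", "emnlp",
--         "naacl", "coling", "aaai", "ijcai", "sigkdd", "sigir", "wsdm",
--         "www", "conference", "workshop",
--     )
--     # single left-to-right scan over positions: at each index check whether
--     # some marker starts there (prefix test), instead of one substring search
--     # per marker over the whole string
--     for j in range(len(v)):
--         if v.startswith(markers, j):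
--             return "inproceedings"
--     return "article"
-- ===== Notes on version B (the rewrite author's own statement) =====
-- stated objective: alternative
-- what changed: Replaces the per-marker substring search (any(m in v for m in markers)) by a single left-to-right scan of the string that at each position tests whether any marker starts there via v.startswith(markers, j), and collapses the redundant final ternary to a plain return.
import Mathlib
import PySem

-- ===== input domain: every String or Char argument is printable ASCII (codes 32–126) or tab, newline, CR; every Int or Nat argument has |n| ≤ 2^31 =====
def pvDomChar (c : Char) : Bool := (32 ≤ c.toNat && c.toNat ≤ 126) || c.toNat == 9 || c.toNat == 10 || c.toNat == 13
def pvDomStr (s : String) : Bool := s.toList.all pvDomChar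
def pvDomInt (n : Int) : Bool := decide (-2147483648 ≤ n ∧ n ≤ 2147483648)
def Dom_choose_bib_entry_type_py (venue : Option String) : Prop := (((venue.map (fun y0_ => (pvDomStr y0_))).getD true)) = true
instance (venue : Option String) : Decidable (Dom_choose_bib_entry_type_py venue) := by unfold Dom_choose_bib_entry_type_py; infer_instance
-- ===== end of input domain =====

-- ===== PORT A =====
-- One honest line: B replaces A's per-marker substring search by a single
-- left-to-right positional scan with prefix tests (alternative decomposition, same cost).
def pvMarkers : List String :=
  ["neurips", "iclr", "icml", "kdd", "cvpr", "eccv", "acl", "emnlp",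
   "naacl", "coling", "aaai", "ijcai", "sigkdd", "sigir", "wsdm",
   "www", "conference", "workshop"]

def choose_bib_entry_type_py (venue : Option String) : String :=
  match venue with
  | none => "article"
  | some s =>
    if s.toList.isEmpty then "article"
    else
      let v := PySem.Str.lower s
      if pvMarkers.any (fun m => PySem.Str.isIn m v) then "inproceedings"
      else if PySem.Str.isIn "arxiv" v || PySem.Str.isIn "journal" v then "article"
      else "article"

-- ===== PORT B =====
-- the loop 'for j in range(len(v)): if v.startswith(markers, j)': structural
-- recursion over the suffixes of v, testing each marker as a prefix at the position
def pvScan (ms : List String) : List Char → Bool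
  | [] => false
  | c :: cs =>
    (ms.any (fun m => PySem.Chars.startswith (c :: cs) m.toList)) || pvScan ms cs

def choose_bib_entry_type_py_alt (venue : Option String) : String :=
  match venue with
  | none => "article"
  | some s =>
    if s.toList.isEmpty then "article"
    else
      let v := PySem.Str.lower s
      if pvScan pvMarkers v.toList then "inproceedings" else "article"

-- ===== PRECONDITION & SPEC =====
def Spec_choose_bib_entry_type_py (venue : Option String) (out : String) : Prop := out = choose_bib_entry_type_py_alt venue
instance (venue : Option String) (out : String) : Decidable (Spec_choose_bib_entry_type_py venue out) := by unfold Spec_choose_bib_entry_type_py; infer_instance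

-- ===== CLAIM (what is proved, stated in full; the proofs are below) =====
def Claim_equal_choose_bib_entry_type_py : Prop := ∀ (venue : Option String), Dom_choose_bib_entry_type_py venue → Spec_choose_bib_entry_type_py venue (choose_bib_entry_type_py venue)

-- ===== LEMMAS AND PROOFS =====

-- B's positional scan finds a marker iff some marker is a substring, for nonempty markers
theorem pvScan_eq_any_isIn (ms : List String) (h : ∀ m ∈ ms, m.toList ≠ []) (s : List Char) :
    pvScan ms s = ms.any (fun m => PySem.Chars.isIn m.toList s) := by
  induction s with
  | nil =>
    symm
    simp only [pvScan, List.any_eq_false, Bool.not_eq_true]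
    intro m hm
    rw [PySem.Chars.isIn_eq_false_iff]
    intro hinf
    exact h m hm (List.eq_nil_of_infix_nil hinf)
  | cons c cs ih =>
    simp only [pvScan, ih]
    rw [Bool.eq_iff_iff]
    simp only [Bool.or_eq_true, List.any_eq_true, PySem.Chars.startswith_iff,
      PySem.Chars.isIn_iff_infix, List.infix_cons_iff]
    constructor
    · rintro (⟨m, hm, hp⟩ | ⟨m, hm, hi⟩)
      · exact ⟨m, hm, Or.inl hp⟩
      · exact ⟨m, hm, Or.inr hi⟩
    · rintro ⟨m, hm, hp | hi⟩
      · exact Or.inl ⟨m, hm, hp⟩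
      · exact Or.inr ⟨m, hm, hi⟩

-- ===== VERDICT (by name: the statement is the Claim_ definition above) =====
theorem choose_bib_entry_type_py_spec : Claim_equal_choose_bib_entry_type_py := by
  intro venue _
  unfold Spec_choose_bib_entry_type_py choose_bib_entry_type_py choose_bib_entry_type_py_alt
  match venue with
  | none => rfl
  | some s =>
    simp only []
    by_cases he : s.toList.isEmpty <;> simp only [he, if_true]
    rw [pvScan_eq_any_isIn pvMarkers (by decide)]
    simp only [PySem.Str.isIn_eq]
    simp
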